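-- pv_equiv track=rewrite | github.com/maniraja1/Python | proj1/Python-Test1/windows_morsels.py | window3
-- ===== SOURCE A (Python) =====
-- def window3(iterable, n):
--     """Return list of tuples of items in given iterable and next n-1 items."""
--     items = []
--     current = ()
--     for item in iterable:
--         if len(current) < n:
--             current = (*current, item)
--         else:
--             current = (*current[1:], item)
--         if len(current) == n:
--             items.append(current)
--     return items
-- ===== SOURCE B (Python) =====
-- def window3(iterable, n):
--     """Return list of tuples of items in given iterable and next n-1 items."""
--     lst = list(iterable)
--     if n <= 0:
--         return []
--     return [tuple(lst[i:i + n]) for i in range(len(lst) - n + 1)]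
-- ===== Notes on version B (the rewrite author's own statement) =====
-- stated objective: simpler
-- what changed: Replaces A's stateful grow/slide window maintenance with materialize-then-slice: one comprehension taking lst[i:i+n] for each valid start index.
import Mathlib
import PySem

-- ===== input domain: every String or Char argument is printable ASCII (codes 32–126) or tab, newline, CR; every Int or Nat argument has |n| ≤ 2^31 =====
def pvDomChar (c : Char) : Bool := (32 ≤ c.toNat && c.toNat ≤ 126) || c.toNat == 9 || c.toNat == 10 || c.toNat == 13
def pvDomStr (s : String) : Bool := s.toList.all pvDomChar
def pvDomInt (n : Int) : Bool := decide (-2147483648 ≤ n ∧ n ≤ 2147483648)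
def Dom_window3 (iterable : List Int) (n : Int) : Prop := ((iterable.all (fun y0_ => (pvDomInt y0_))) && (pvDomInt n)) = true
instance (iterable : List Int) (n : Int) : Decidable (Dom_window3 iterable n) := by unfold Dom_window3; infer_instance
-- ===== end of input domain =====

-- B replaces A's stateful grow/slide window maintenance with a materialize-then-slice comprehension (same cost, plainer).


-- ===== PORT A =====
-- literal port: fold over the iterable carrying (items, current); tuples become lists
def window3 (iterable : List Int) (n : Int) : List (List Int) :=
  (iterable.foldl
    (fun (st : List (List Int) × List Int) item =>
      let current := if (st.2.length : Int) < n then st.2 ++ [item] else st.2.drop 1 ++ [item]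
      let items := if (current.length : Int) = n then st.1 ++ [current] else st.1
      (items, current))
    ([], [])).1

-- ===== PORT B =====
def window3_alt (iterable : List Int) (n : Int) : List (List Int) :=
  if n ≤ 0 then []
  else (PySem.List.pyRange 0 ((iterable.length : Int) - n + 1) 1).map
    (fun i => PySem.List.slice iterable (some i) (some (i + n)))

-- ===== PRECONDITION & SPEC =====
def Spec_window3 (iterable : List Int) (n : Int) (out : List (List Int)) : Prop := out = window3_alt iterable n
instance (iterable : List Int) (n : Int) (out : List (List Int)) : Decidable (Spec_window3 iterable n out) := by unfold Spec_window3; infer_instance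

-- ===== CLAIM (what is proved, stated in full; the proofs are below) =====
def Claim_equal_window3 : Prop := ∀ (iterable : List Int) (n : Int), Dom_window3 iterable n → Spec_window3 iterable n (window3 iterable n)

-- ===== LEMMAS AND PROOFS =====

-- A's loop with the accumulator stripped off: just the windows emitted from state `cur`
def goW (n : Int) (cur : List Int) : List Int → List (List Int)
  | [] => []
  | x :: xs =>
    let cur' := if (cur.length : Int) < n then cur ++ [x] else cur.drop 1 ++ [x]
    (if (cur'.length : Int) = n then [cur'] else []) ++ goW n cur' xs

lemma foldA_eq (n : Int) (xs : List Int) : ∀ (acc : List (List Int)) (cur : List Int),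
    (xs.foldl
      (fun (st : List (List Int) × List Int) item =>
        let current := if (st.2.length : Int) < n then st.2 ++ [item] else st.2.drop 1 ++ [item]
        let items := if (current.length : Int) = n then st.1 ++ [current] else st.1
        (items, current))
      (acc, cur)).1 = acc ++ goW n cur xs := by
  induction xs with
  | nil => intro acc cur; simp [goW]
  | cons x xs ih =>
    intro acc cur
    simp only [List.foldl_cons, goW]
    rw [ih]
    split <;> split <;> simp

lemma goW_nonpos (n : Int) (hn : n ≤ 0) (xs : List Int) : ∀ cur : List Int, goW n cur xs = [] := by
  induction xs with
  | nil => intro cur; rfl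
  | cons x xs ih =>
    intro cur
    simp only [goW]
    rw [if_neg (show ¬((cur.length : Int) < n) by omega)]
    rw [if_neg (show ¬(((cur.drop 1 ++ [x]).length : Int) = n) by
      simp only [List.length_append, List.length_drop, List.length_cons, List.length_nil]
      omega)]
    rw [ih]
    simp

lemma goW_sat (n : Int) (hn : 1 ≤ n) (xs : List Int) : ∀ cur : List Int, (cur.length : Int) = n →
    goW n cur xs = (List.range xs.length).map (fun j => ((cur ++ xs).drop (j + 1)).take n.toNat) := by
  induction xs with
  | nil => intro cur _; simp [goW]
  | cons x xs ih =>
    intro cur hcur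
    have hne : cur ≠ [] := by
      intro h; subst h; simp only [List.length_nil, Int.natCast_zero] at hcur; omega
    simp only [goW]
    rw [if_neg (show ¬((cur.length : Int) < n) by omega)]
    have hlen : ((cur.drop 1 ++ [x]).length : Int) = n := by
      simp only [List.length_append, List.length_drop, List.length_cons, List.length_nil]
      omega
    rw [if_pos hlen, ih _ hlen]
    have hfull : cur.drop 1 ++ [x] ++ xs = (cur ++ x :: xs).drop 1 := by
      cases cur with
      | nil => exact absurd rfl hne
      | cons c cs => simp
    simp only [List.length_cons]
    rw [List.range_succ_eq_map]
    simp only [List.map_cons, List.map_map, List.singleton_append, List.cons.injEq]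
    refine ⟨?_, ?_⟩
    · -- head window: the new current is the first emitted window
      cases cur with
      | nil => exact absurd rfl hne
      | cons c cs =>
        have hk' : n.toNat = cs.length + 1 := by
          simp only [List.length_cons] at hcur; omega
        simp [hk', List.take_append]
    · apply List.map_congr_left
      intro j _
      simp only [Function.comp]
      rw [hfull, List.drop_drop]
      congr 2
      omega

lemma goW_grow (n : Int) (hn : 1 ≤ n) (xs : List Int) : ∀ cur : List Int, (cur.length : Int) < n →
    goW n cur xs = (List.range (cur.length + xs.length + 1 - n.toNat)).map
      (fun j => ((cur ++ xs).drop j).take n.toNat) := by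
  induction xs with
  | nil =>
    intro cur hcur
    have h0 : cur.length + 1 - n.toNat = 0 := by omega
    simp [goW, h0]
  | cons x xs ih =>
    intro cur hcur
    have hcx : ((cur ++ [x]).length : Int) = (cur.length : Int) + 1 := by
      simp
    simp only [goW]
    rw [if_pos hcur]
    by_cases hfull : ((cur ++ [x]).length : Int) = n
    · rw [if_pos hfull, goW_sat n hn xs _ hfull]
      have hfull' : (cur.length : Int) + 1 = n := by simpa using hfull
      have hk' : n.toNat = cur.length + 1 := by omega
      have hcnt : cur.length + (x :: xs).length + 1 - n.toNat = xs.length + 1 := by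
        simp only [List.length_cons]; omega
      rw [hcnt, List.range_succ_eq_map]
      simp only [List.map_cons, List.map_map, List.singleton_append, List.cons.injEq]
      refine ⟨?_, ?_⟩
      · -- head window
        simp [hk', List.take_append]
      · apply List.map_congr_left
        intro j _
        simp only [Function.comp]
        rw [List.append_assoc, List.singleton_append]
    · rw [if_neg hfull]
      have hne' : ¬((cur.length : Int) + 1 = n) := by simpa using hfull
      have hlt : (((cur ++ [x]).length : Int)) < n := by
        simp only [List.length_append, List.length_cons, List.length_nil]; omega
      rw [ih _ hlt]
      have hA : (cur ++ [x]).length + xs.length + 1 - n.toNat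
          = cur.length + (x :: xs).length + 1 - n.toNat := by
        simp only [List.length_append, List.length_cons, List.length_nil]; omega
      rw [hA, List.append_assoc, List.singleton_append]
      simp only [List.nil_append]

lemma range_map_eq (lst : List Int) (n : Int) (hn : 1 ≤ n) :
    (PySem.List.pyRange 0 ((lst.length : Int) - n + 1) 1).map
      (fun i => PySem.List.slice lst (some i) (some (i + n)))
    = (List.range (0 + lst.length + 1 - n.toNat)).map (fun j => (lst.drop j).take n.toNat) := by
  rw [PySem.List.pyRange_one, List.map_map]
  have hcnt : (((lst.length : Int) - n + 1) - 0).toNat = 0 + lst.length + 1 - n.toNat := by omega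
  rw [hcnt]
  apply List.map_congr_left
  intro j _
  simp only [Function.comp]
  have h1 : (0 + (j : Int)).toNat = j := by omega
  have h2 : (0 + (j : Int) + n).toNat - j = n.toNat := by omega
  rw [PySem.List.slice_toNat lst (by omega) (by omega), h1, h2]

-- ===== VERDICT (by name: the statement is the Claim_ definition above) =====
theorem window3_spec : Claim_equal_window3 := by
  intro lst n _
  unfold Spec_window3 window3 window3_alt
  rw [foldA_eq, List.nil_append]
  by_cases hn : n ≤ 0
  · rw [if_pos hn, goW_nonpos n hn]
  · rw [if_neg hn]
    have h1 : 1 ≤ n := by omega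
    rw [goW_grow n h1 lst []
      (show ((List.length ([] : List Int) : Int)) < n by
        simp only [List.length_nil, Int.natCast_zero]; omega),
      range_map_eq lst n h1]
    simp
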